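-- pv_equiv track=rewrite | github.com/nemmiz/aoc2019 | python/18.py | split_map
-- ===== SOURCE A (Python) =====
-- def find_positions(the_map):
--     positions = {}
--     for y, line in enumerate(the_map):
--         for x, c in enumerate(line):
--             if c not in '.#':
--                 positions[c] = (x, y)
--     return positions
--
-- def split_map(the_map):
--     the_map = the_map.copy()
--
--     for y, line in enumerate(the_map):
--         x = line.find('@')
--         if x != -1:
--             break
--
--     the_map[y-1] = the_map[y-1][:x-1] + '@#@' + the_map[y-1][x+2:]
--     the_map[y  ] = the_map[y  ][:x-1] + '###' + the_map[y  ][x+2:]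
--     the_map[y+1] = the_map[y+1][:x-1] + '@#@' + the_map[y+1][x+2:]
--
--     tmp_quadrants = []
--     tmp_quadrants.append([line[:x+1] for line in the_map[:y+1]])
--     tmp_quadrants.append([line[x:] for line in the_map[:y+1]])
--     tmp_quadrants.append([line[:x+1] for line in the_map[y:]])
--     tmp_quadrants.append([line[x:] for line in the_map[y:]])
--
--     quadrants = []
--     for quadrant in tmp_quadrants:
--         positions = find_positions(quadrant)
--         keys_in_map = frozenset((x.upper() for x in positions.keys() if x.islower()))
--         locks_in_map = frozenset((x for x in positions.keys() if x.isupper()))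
--         locks_to_remove = locks_in_map - keys_in_map
--
--         new_quadrant = []
--         for line in quadrant:
--             new_line = line
--             for lock in locks_to_remove:
--                 new_line = new_line.replace(lock, '.')
--             new_quadrant.append(new_line)
--         quadrants.append(new_quadrant)
--
--     return quadrants
-- ===== SOURCE B (Python) =====
-- def split_map(the_map):
--     the_map = the_map.copy()
--
--     y = next(i for i, line in enumerate(the_map) if '@' in line)
--     x = the_map[y].find('@')
--
--     for dy, mid in ((-1, '@#@'), (0, '###'), (1, '@#@')):
--         the_map[y + dy] = the_map[y + dy][:x-1] + mid + the_map[y + dy][x+2:]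
--
--     # One coordinate-classification pass over the whole stamped map: each letter
--     # is filed into every quadrant whose region (rows <=y / >=y, cols <=x / >=x)
--     # contains it, instead of re-scanning each quadrant slice separately.
--     letters = [set(), set(), set(), set()]
--     for r, line in enumerate(the_map):
--         for k, c in enumerate(line):
--             if c not in '.#':
--                 if r <= y and k <= x: letters[0].add(c)
--                 if r <= y and k >= x: letters[1].add(c)
--                 if r >= y and k <= x: letters[2].add(c)
--                 if r >= y and k >= x: letters[3].add(c)
--
--     bounds = ((None, y + 1, None, x + 1), (None, y + 1, x, None),
--               (y, None, None, x + 1), (y, None, x, None))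
--     result = []
--     for q, (r0, r1, c0, c1) in enumerate(bounds):
--         locks = {c for c in letters[q] if c.isupper() and c.lower() not in letters[q]}
--         result.append([''.join('.' if c in locks else c for c in line[c0:c1])
--                        for line in the_map[r0:r1]])
--     return result
-- ===== Notes on version B (the rewrite author's own statement) =====
-- stated objective: alternative
-- what changed: Instead of slicing the stamped map into four quadrant lists and re-scanning each slice (building a coordinate dict per quadrant, then one full-line .replace pass per keyless lock), B makes ONE coordinate-classification pass over the whole stamped map filing each letter into the quadrant sets its (row,col) falls in, then emits every quadrant directly by slicing with an inline single-pass character rewrite; the '@' row is found with next()/find instead of a break-out loop.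
import Mathlib
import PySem

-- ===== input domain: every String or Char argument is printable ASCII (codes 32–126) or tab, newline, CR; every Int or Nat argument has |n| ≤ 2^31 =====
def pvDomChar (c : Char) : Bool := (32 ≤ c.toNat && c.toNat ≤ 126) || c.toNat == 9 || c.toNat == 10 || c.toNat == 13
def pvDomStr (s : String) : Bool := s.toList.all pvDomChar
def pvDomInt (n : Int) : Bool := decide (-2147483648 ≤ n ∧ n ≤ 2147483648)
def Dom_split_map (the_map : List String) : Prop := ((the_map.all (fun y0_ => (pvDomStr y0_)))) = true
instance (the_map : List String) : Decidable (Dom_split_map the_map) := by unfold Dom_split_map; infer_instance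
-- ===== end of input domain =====

-- B replaces A's slice-then-rescan quadrant processing (coordinate dict per quadrant slice, one
-- full-line .replace per keyless lock) by ONE coordinate-classification pass over the stamped map
-- filing each letter into the quadrant sets its (row,col) falls in, then emits each quadrant by
-- slicing with an inline single-pass character rewrite; same return value wherever A returns.

-- ===== shared low-level helpers (identical expressions in both Python sources) =====

-- m[i] read with Python's negative-index rule (default [] unreachable under Pre_)
def pyLineGet (m : List (List Char)) (i : Int) : List Char := (PySem.List.pyGet? m i).getD []

-- m[i] = v with Python's negative-index rule; exact for in-range i (out of range raises IndexError in Python: excluded by Pre_)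
def pyLineSet (m : List (List Char)) (i : Int) (v : List Char) : List (List Char) :=
  m.set (if i < 0 then (m.length : Int) + i else i).toNat v

-- line[:x-1] + mid + line[x+2:]  (the stamping expression, identical in both sources)
def stampLine (line : List Char) (x : Int) (mid : List Char) : List Char :=
  PySem.Chars.slice line none (some (x - 1)) ++ mid ++ PySem.Chars.slice line (some (x + 2)) none

-- ===== PORT A =====
-- strings are handled as code-point lists (String.toList / String.ofList), exact

-- 'for y, line in enumerate(the_map): x = line.find('@'); if x != -1: break' — the loop variables (y, x) after the loop
def splitMapScanA : List (Int × List Char) → Int × Int → Int × Int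
  | [], acc => acc
  | p :: rest, _ =>
    let x := PySem.Chars.find p.2 ['@']
    if x ≠ -1 then (p.1, x) else splitMapScanA rest (p.1, x)

def find_positions (the_map : List (List Char)) : PySem.Dict Char (Int × Int) :=
  (PySem.List.enumerate the_map 0).foldl (fun d yl =>
    (PySem.List.enumerate yl.2 0).foldl (fun d2 xc =>
      if PySem.Chars.isIn [xc.2] ['.', '#'] then d2 else d2.insert xc.2 (xc.1, yl.1)) d)
    PySem.Dict.empty

-- body of A's 'for quadrant in tmp_quadrants' loop
def splitMapStripA (quadrant : List (List Char)) : List (List Char) :=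
  let positions := find_positions quadrant
  let keys_in_map : PySem.Set Char :=
    PySem.Set.ofList ((positions.keys.filter (fun c => PySem.Chars.islower c)).map PySem.Chars.upperChar)
  let locks_in_map : PySem.Set Char :=
    PySem.Set.ofList (positions.keys.filter (fun c => PySem.Chars.isupper c))
  let locks_to_remove := PySem.Set.diff locks_in_map keys_in_map
  quadrant.foldl (fun nq line =>
    nq ++ [locks_to_remove.foldl (fun nl lock => PySem.Chars.replace nl [lock] ['.']) line]) []

def split_map (the_map : List String) : List (List String) :=
  let m := the_map.map String.toList
  -- (0, -1): with an empty map Python leaves y unbound (NameError) — excluded by Pre_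
  let yx := splitMapScanA (PySem.List.enumerate m 0) (0, -1)
  let y := yx.1
  let x := yx.2
  let m1 := pyLineSet m (y - 1) (stampLine (pyLineGet m (y - 1)) x ['@', '#', '@'])
  let m2 := pyLineSet m1 y (stampLine (pyLineGet m1 y) x ['#', '#', '#'])
  let m3 := pyLineSet m2 (y + 1) (stampLine (pyLineGet m2 (y + 1)) x ['@', '#', '@'])
  let tmp_quadrants :=
    [(PySem.List.slice m3 none (some (y + 1))).map (fun line => PySem.Chars.slice line none (some (x + 1))),
     (PySem.List.slice m3 none (some (y + 1))).map (fun line => PySem.Chars.slice line (some x) none),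
     (PySem.List.slice m3 (some y) none).map (fun line => PySem.Chars.slice line none (some (x + 1))),
     (PySem.List.slice m3 (some y) none).map (fun line => PySem.Chars.slice line (some x) none)]
  let quadrants := tmp_quadrants.foldl (fun acc q => acc ++ [splitMapStripA q]) []
  quadrants.map (fun q => q.map String.ofList)

-- ===== PORT B =====

-- next(i for i, line in enumerate(the_map) if '@' in line); none = StopIteration (excluded by Pre_)
def splitMapFindRow : List (Int × List Char) → Option Int
  | [] => none
  | p :: rest => if PySem.Chars.isIn ['@'] p.2 then some p.1 else splitMapFindRow rest

-- Source B's classification pass: one walk over the stamped map, filing every letter into the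
-- letter set of each quadrant whose region (rows ≤y/≥y, cols ≤x/≥x) contains its coordinates
def collectLetters (y x : Int) (m : List (List Char)) :
    PySem.Set Char × PySem.Set Char × PySem.Set Char × PySem.Set Char :=
  (PySem.List.enumerate m 0).foldl (fun st rl =>
    (PySem.List.enumerate rl.2 0).foldl (fun st2 kc =>
      if PySem.Chars.isIn [kc.2] ['.', '#'] then st2 else
        (if rl.1 ≤ y ∧ kc.1 ≤ x then PySem.Set.add st2.1 kc.2 else st2.1,
         if rl.1 ≤ y ∧ x ≤ kc.1 then PySem.Set.add st2.2.1 kc.2 else st2.2.1,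
         if y ≤ rl.1 ∧ kc.1 ≤ x then PySem.Set.add st2.2.2.1 kc.2 else st2.2.2.1,
         if y ≤ rl.1 ∧ x ≤ kc.1 then PySem.Set.add st2.2.2.2 kc.2 else st2.2.2.2)) st)
    (PySem.Set.empty, PySem.Set.empty, PySem.Set.empty, PySem.Set.empty)

-- body of Source B's 'for q, (r0, r1, c0, c1) in enumerate(bounds)' loop
def buildQuadrantB (letters : PySem.Set Char) (rows : List (List Char)) (c0 c1 : Option Int) :
    List (List Char) :=
  let locks : PySem.Set Char := PySem.Set.ofList (letters.filter (fun c =>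
    PySem.Chars.isupper c && !(PySem.Set.contains letters (PySem.Chars.lowerChar c))))
  rows.map (fun line => (PySem.Chars.slice line c0 c1).map
    (fun c => if PySem.Set.contains locks c then '.' else c))

def split_map_alt (the_map : List String) : List (List String) :=
  let m := the_map.map String.toList
  match splitMapFindRow (PySem.List.enumerate m 0) with
  | none => []   -- Python raises StopIteration here — excluded by Pre_
  | some y =>
    let x := PySem.Chars.find (pyLineGet m y) ['@']
    let m3 := [((-1 : Int), ['@', '#', '@']), (0, ['#', '#', '#']), (1, ['@', '#', '@'])].foldl
      (fun acc p => pyLineSet acc (y + p.1) (stampLine (pyLineGet acc (y + p.1)) x p.2)) m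
    let L := collectLetters y x m3
    let top := PySem.List.slice m3 none (some (y + 1))
    let bottom := PySem.List.slice m3 (some y) none
    let quads :=
      [buildQuadrantB L.1 top none (some (x + 1)),
       buildQuadrantB L.2.1 top (some x) none,
       buildQuadrantB L.2.2.1 bottom none (some (x + 1)),
       buildQuadrantB L.2.2.2 bottom (some x) none]
    quads.map (fun q => q.map String.ofList)

-- ===== PRECONDITION & SPEC =====

-- Exactly where the Python A returns: some line contains '@' and the first such line is not the last row
-- (otherwise A raises — NameError on [], IndexError on the_map[y+1] when no '@' exists or it sits in the last row).
def Pre_split_map (the_map : List String) : Prop :=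
  the_map.any (fun s => PySem.Str.isIn "@" s) = true ∧
  the_map.findIdx (fun s => PySem.Str.isIn "@" s) + 1 < the_map.length
instance (the_map : List String) : Decidable (Pre_split_map the_map) := by unfold Pre_split_map; infer_instance

def pvWitness_split_map : List String := ["#####", "#b@B#", "#aA.#", "#####"]

def Spec_split_map (the_map : List String) (out : List (List String)) : Prop := out = split_map_alt the_map
instance (the_map : List String) (out : List (List String)) : Decidable (Spec_split_map the_map out) := by unfold Spec_split_map; infer_instance

-- ===== CLAIM (what is proved, stated in full; the proofs are below) =====
def Claim_equal_split_map : Prop := ∀ (the_map : List String), Dom_split_map the_map → Pre_split_map the_map → Spec_split_map the_map (split_map the_map)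

-- ===== LEMMAS AND PROOFS =====

theorem char_le_iff (a b : Char) : a ≤ b ↔ a.toNat ≤ b.toNat := by
  rw [Char.le_def, UInt32.le_iff_toBitVec_le]; rfl

theorem isupper_iff (c : Char) : PySem.Chars.isupper c = true ↔ 65 ≤ c.toNat ∧ c.toNat ≤ 90 := by
  have hA : ('A' : Char).toNat = 65 := by decide
  have hZ : ('Z' : Char).toNat = 90 := by decide
  simp [PySem.Chars.isupper, char_le_iff, hA, hZ]

theorem islower_iff (c : Char) : PySem.Chars.islower c = true ↔ 97 ≤ c.toNat ∧ c.toNat ≤ 122 := by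
  have ha : ('a' : Char).toNat = 97 := by decide
  have hz : ('z' : Char).toNat = 122 := by decide
  simp [PySem.Chars.islower, char_le_iff, ha, hz]

theorem lowerChar_of_upper (c : Char) (h : PySem.Chars.isupper c = true) :
    PySem.Chars.islower (PySem.Chars.lowerChar c) = true ∧
    PySem.Chars.upperChar (PySem.Chars.lowerChar c) = c := by
  have hb := (isupper_iff c).mp h
  have hlow : PySem.Chars.lowerChar c = Char.ofNat (c.toNat + 32) := by
    simp only [PySem.Chars.lowerChar, h, if_pos]
  have ht : (Char.ofNat (c.toNat + 32)).toNat = c.toNat + 32 := by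
    rw [Char.toNat_ofNat, if_pos (Or.inl (by omega))]
  have hil : PySem.Chars.islower (PySem.Chars.lowerChar c) = true := by
    rw [hlow, islower_iff, ht]; omega
  refine ⟨hil, ?_⟩
  rw [hlow] at hil
  simp only [PySem.Chars.upperChar, hlow, hil, if_pos, ht]
  rw [show c.toNat + 32 - 32 = c.toNat by omega, Char.ofNat_toNat]

theorem upperChar_of_lower (k : Char) (h : PySem.Chars.islower k = true) :
    PySem.Chars.isupper (PySem.Chars.upperChar k) = true ∧
    PySem.Chars.lowerChar (PySem.Chars.upperChar k) = k := by
  have hb := (islower_iff k).mp h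
  have hup : PySem.Chars.upperChar k = Char.ofNat (k.toNat - 32) := by
    simp only [PySem.Chars.upperChar, h, if_pos]
  have ht : (Char.ofNat (k.toNat - 32)).toNat = k.toNat - 32 := by
    rw [Char.toNat_ofNat, if_pos (Or.inl (by omega))]
  have hiu : PySem.Chars.isupper (PySem.Chars.upperChar k) = true := by
    rw [hup, isupper_iff, ht]; omega
  refine ⟨hiu, ?_⟩
  rw [hup] at hiu
  simp only [PySem.Chars.lowerChar, hup, hiu, if_pos, ht]
  rw [show k.toNat - 32 + 32 = k.toNat by omega, Char.ofNat_toNat]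

theorem isIn_singleton_iff (a : Char) (l : List Char) :
    PySem.Chars.isIn [a] l = true ↔ a ∈ l := by
  rw [PySem.Chars.isIn_iff_infix, List.singleton_infix_iff]

-- replacing a single character is a character-wise pass
theorem replace_go_single (k : Char) :
    ∀ (fuel : Nat) (l acc : List Char), l.length ≤ fuel →
      PySem.Chars.replace.go [k] ['.'] fuel l acc =
        acc.reverse ++ l.map (fun c => if c = k then '.' else c) := by
  intro fuel
  induction fuel with
  | zero =>
    intro l acc h
    have : l = [] := by cases l <;> simp_all
    subst this
    simp [PySem.Chars.replace.go]
  | succ n ih =>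
    intro l acc h
    cases l with
    | nil => simp [PySem.Chars.replace.go]
    | cons c t =>
      rw [PySem.Chars.replace.go]
      by_cases hc : c = k
      · subst hc
        have hp : [c].isPrefixOf (c :: t) = true := by simp [List.isPrefixOf]
        simp only [hp, if_pos]
        rw [ih _ _ (by simpa using Nat.le_of_succ_le_succ (by simpa using h))]
        simp
      · have hp : [k].isPrefixOf (c :: t) = false := by simp [List.isPrefixOf, Ne.symm hc]
        simp only [hp]
        rw [if_neg (by simp)]
        rw [ih _ _ (by simpa using h)]
        simp [hc]

theorem replace_single (k : Char) (l : List Char) :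
    PySem.Chars.replace l [k] ['.'] = l.map (fun c => if c = k then '.' else c) := by
  rw [PySem.Chars.replace]
  simp only [List.isEmpty_cons, Bool.false_eq_true, if_false]
  rw [replace_go_single k l.length l [] le_rfl]
  simp

theorem foldl_replace_eq_map (L : List Char) (hdot : '.' ∉ L) :
    ∀ ln : List Char,
      L.foldl (fun nl lock => PySem.Chars.replace nl [lock] ['.']) ln =
        ln.map (fun c => if c ∈ L then '.' else c) := by
  induction L with
  | nil => intro ln; simp
  | cons k L ih =>
    intro ln
    have hdL : '.' ∉ L := fun h => hdot (List.mem_cons_of_mem _ h)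
    rw [List.foldl_cons, replace_single, ih hdL, List.map_map]
    apply List.map_congr_left
    intro c _
    by_cases hck : c = k
    · subst hck; simp [hdL]
    · simp [Function.comp, hck]

theorem mem_keys_inner (ln : List Char) (yv : Int) (d : PySem.Dict Char (Int × Int)) (c : Char) :
    c ∈ ((PySem.List.enumerate ln 0).foldl (fun d2 xc =>
      if PySem.Chars.isIn [xc.2] ['.', '#'] then d2 else d2.insert xc.2 (xc.1, yv)) d).keys ↔
    c ∈ d.keys ∨ (c ∈ ln ∧ ¬(c = '.' ∨ c = '#')) := by
  have hstep : (fun (d2 : PySem.Dict Char (Int × Int)) (xc : Int × Char) =>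
      if PySem.Chars.isIn [xc.2] ['.', '#'] then d2 else d2.insert xc.2 (xc.1, yv)) =
      (fun d2 xc => if (!PySem.Chars.isIn [xc.2] ['.', '#']) = true then d2.insert xc.2 (xc.1, yv) else d2) := by
    funext d2 xc
    by_cases h : PySem.Chars.isIn [xc.2] ['.', '#'] = true <;> simp [h]
  rw [hstep, PySem.List.foldl_if_eq_foldl_filter,
    PySem.Dict.keys_foldl_insert_key (key := fun xc : Int × Char => xc.2) (f := fun _ xc => (xc.1, yv)),
    PySem.Set.mem_update]
  constructor
  · rintro (h | h)
    · exact Or.inl h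
    · right
      obtain ⟨xc, hmem, rfl⟩ := List.mem_map.mp h
      have hf := List.mem_filter.mp hmem
      refine ⟨?_, ?_⟩
      · obtain ⟨k, hk, rfl⟩ := (PySem.List.mem_enumerate_iff _ _ _).mp hf.1
        simp
      · intro hc
        have h2 : PySem.Chars.isIn [xc.2] ['.', '#'] = false := by simpa using hf.2
        rw [Bool.eq_false_iff] at h2
        exact h2 ((isIn_singleton_iff _ _).mpr (by rcases hc with h | h <;> simp [h]))
  · rintro (h | ⟨hcl, hns⟩)
    · exact Or.inl h
    · right
      obtain ⟨k, hk, hget⟩ := List.mem_iff_getElem.mp hcl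
      refine List.mem_map.mpr ⟨((0 : Int) + k, c), List.mem_filter.mpr ⟨?_, ?_⟩, rfl⟩
      · exact (PySem.List.mem_enumerate_iff _ _ _).mpr ⟨k, hk, by simp [hget]⟩
      · simp only [Bool.not_eq_eq_eq_not, Bool.not_true]
        rw [Bool.eq_false_iff]
        intro hin
        have hm := (isIn_singleton_iff _ _).mp (by simpa using hin)
        simp only [List.mem_cons, List.not_mem_nil, or_false] at hm
        exact hns hm

theorem mem_keys_outer (c : Char) :
    ∀ (el : List (Int × List Char)) (d : PySem.Dict Char (Int × Int)),
      c ∈ (el.foldl (fun d yl =>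
        (PySem.List.enumerate yl.2 0).foldl (fun d2 xc =>
          if PySem.Chars.isIn [xc.2] ['.', '#'] then d2 else d2.insert xc.2 (xc.1, yl.1)) d) d).keys ↔
      c ∈ d.keys ∨ ∃ p ∈ el, c ∈ p.2 ∧ ¬(c = '.' ∨ c = '#') := by
  intro el
  induction el with
  | nil => intro d; simp
  | cons p rest ih =>
    intro d
    rw [List.foldl_cons, ih, mem_keys_inner]
    constructor
    · rintro ((h | h) | h)
      · exact Or.inl h
      · exact Or.inr ⟨p, List.mem_cons_self, h⟩
      · obtain ⟨p', hp', h'⟩ := h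
        exact Or.inr ⟨p', List.mem_cons_of_mem _ hp', h'⟩
    · rintro (h | ⟨p', hp', h'⟩)
      · exact Or.inl (Or.inl h)
      · rcases List.mem_cons.mp hp' with rfl | hmem
        · exact Or.inl (Or.inr h')
        · exact Or.inr ⟨p', hmem, h'⟩

theorem mem_keys_find_positions (q : List (List Char)) (c : Char) :
    c ∈ (find_positions q).keys ↔ ∃ ln ∈ q, c ∈ ln ∧ ¬(c = '.' ∨ c = '#') := by
  rw [find_positions, mem_keys_outer]
  simp only [PySem.Dict.empty]
  constructor
  · rintro (h | ⟨p, hp, h⟩)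
    · simp [PySem.Dict.keys] at h
    · obtain ⟨k, hk, rfl⟩ := (PySem.List.mem_enumerate_iff _ _ _).mp hp
      exact ⟨q[k], List.getElem_mem hk, h⟩
  · rintro ⟨ln, hline, h⟩
    obtain ⟨k, hk, rfl⟩ := List.mem_iff_getElem.mp hline
    exact Or.inr ⟨((0 : Int) + k, q[k]), (PySem.List.mem_enumerate_iff _ _ _).mpr ⟨k, hk, rfl⟩, h⟩

-- A's strip loop, for ANY set S holding exactly the quadrant's letters
theorem stripA_eq (q : List (List Char)) (S : PySem.Set Char)
    (hS : ∀ c, c ∈ S ↔ ∃ ln ∈ q, c ∈ ln ∧ ¬(c = '.' ∨ c = '#')) :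
    splitMapStripA q = q.map (fun ln => ln.map (fun c =>
      if PySem.Set.contains (PySem.Set.ofList (S.filter (fun c =>
        PySem.Chars.isupper c && !(PySem.Set.contains S (PySem.Chars.lowerChar c))))) c
      then '.' else c)) := by
  unfold splitMapStripA
  simp only []
  set locksB : PySem.Set Char :=
    PySem.Set.ofList (S.filter (fun c =>
      PySem.Chars.isupper c && !(PySem.Set.contains S (PySem.Chars.lowerChar c)))) with hlocksB
  set L : PySem.Set Char :=
    PySem.Set.diff (PySem.Set.ofList ((find_positions q).keys.filter (fun c => PySem.Chars.isupper c)))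
      (PySem.Set.ofList ((((find_positions q).keys.filter (fun c => PySem.Chars.islower c)).map PySem.Chars.upperChar))) with hL
  have hMem : ∀ c, c ∈ L ↔ PySem.Set.contains locksB c = true := by
    intro c
    rw [PySem.Set.contains_iff, hL, PySem.Set.mem_diff, hlocksB]
    simp only [PySem.Set.mem_ofList, List.mem_filter, List.mem_map]
    constructor
    · rintro ⟨⟨hkeys, hup⟩, hnot⟩
      have hKc := (mem_keys_find_positions q c).mp hkeys
      refine ⟨(hS c).mpr hKc, ?_⟩
      simp only [Bool.and_eq_true, hup, true_and, Bool.not_eq_eq_eq_not, Bool.not_true,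
        Bool.eq_false_iff]
      intro hcont
      apply hnot
      have hlc := (PySem.Set.contains_iff _ _).mp hcont
      have hKlc := (hS _).mp hlc
      exact ⟨PySem.Chars.lowerChar c,
        ⟨(mem_keys_find_positions q _).mpr hKlc, (lowerChar_of_upper c hup).1⟩,
        (lowerChar_of_upper c hup).2⟩
    · rintro ⟨hc, hb⟩
      simp only [Bool.and_eq_true, Bool.not_eq_eq_eq_not, Bool.not_true, Bool.eq_false_iff] at hb
      obtain ⟨hup, hncont⟩ := hb
      refine ⟨⟨(mem_keys_find_positions q c).mpr ((hS c).mp hc), hup⟩, ?_⟩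
      intro hmem
      obtain ⟨k, hkk, rfl⟩ := hmem
      apply hncont
      rw [PySem.Set.contains_iff]
      apply (hS _).mpr
      have h2 := (upperChar_of_lower k hkk.2).2
      rw [h2]
      exact (mem_keys_find_positions q k).mp hkk.1
  have hdot : '.' ∉ L := by
    intro hmem
    have hd := (PySem.Set.mem_diff _ _ _).mp hmem
    have hu := (List.mem_filter.mp ((PySem.Set.mem_ofList _ _).mp hd.1)).2
    simp [PySem.Chars.isupper] at hu
  rw [PySem.List.foldl_append_singleton_eq_map, List.nil_append]
  apply List.map_congr_left
  intro ln _
  rw [foldl_replace_eq_map L hdot]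
  apply List.map_congr_left
  intro c _
  by_cases hc : c ∈ L
  · rw [if_pos hc, if_pos ((hMem c).mp hc)]
  · rw [if_neg hc, if_neg (fun h => hc ((hMem c).mpr h))]

theorem pyGet?_cons_succ {α : Type} (a : α) (l : List α) (i : Int) (h : 0 ≤ i) :
    PySem.List.pyGet? (a :: l) (i + 1) = PySem.List.pyGet? l i := by
  obtain ⟨n, rfl⟩ := Int.eq_ofNat_of_zero_le h
  have h1 : ((n : Int) + 1) = ((n + 1 : Nat) : Int) := by push_cast; ring
  rw [h1, PySem.List.pyGet?_natCast, PySem.List.pyGet?_natCast]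
  simp

theorem pyGet?_zero_cons {α : Type} (a : α) (l : List α) :
    PySem.List.pyGet? (a :: l) 0 = some a := by
  have h0 : ((0 : Nat) : Int) = (0 : Int) := rfl
  rw [← h0, PySem.List.pyGet?_natCast]
  simp

theorem scan_spec :
    ∀ (l : List (List Char)) (s : Int) (acc : Int × Int),
      l.any (fun cs => PySem.Chars.isIn ['@'] cs) = true →
      ∃ cs,
        splitMapFindRow (PySem.List.enumerate l s) = some (splitMapScanA (PySem.List.enumerate l s) acc).1 ∧
        (splitMapScanA (PySem.List.enumerate l s) acc).2 = PySem.Chars.find cs ['@'] ∧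
        PySem.Chars.find cs ['@'] ≠ -1 ∧
        s ≤ (splitMapScanA (PySem.List.enumerate l s) acc).1 ∧
        PySem.List.pyGet? l ((splitMapScanA (PySem.List.enumerate l s) acc).1 - s) = some cs := by
  intro l
  induction l with
  | nil => intro s acc h; simp at h
  | cons cs t ih =>
    intro s acc h
    rw [PySem.List.enumerate_cons]
    by_cases hin : PySem.Chars.isIn ['@'] cs = true
    · have hfind : PySem.Chars.find cs ['@'] ≠ -1 := by
        rw [PySem.Chars.find_ne_neg_one_iff]
        exact (PySem.Chars.isIn_iff_infix _ _).mp hin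
      refine ⟨cs, ?_, ?_, hfind, ?_, ?_⟩
      · simp [splitMapFindRow, splitMapScanA, hin, hfind]
      · simp [splitMapScanA, hfind]
      · simp [splitMapScanA, hfind]
      · simp only [splitMapScanA, hfind, if_pos, ne_eq, not_false_iff, sub_self]
        exact pyGet?_zero_cons cs t
    · have hfind : PySem.Chars.find cs ['@'] = -1 := by
        rw [PySem.Chars.find_eq_neg_one_iff]
        intro hi
        exact hin ((PySem.Chars.isIn_iff_infix _ _).mpr hi)
      have ht : t.any (fun cs => PySem.Chars.isIn ['@'] cs) = true := by
        simp [hin] at h; simpa using h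
      obtain ⟨cs', h1, h2, h3, h4, h5⟩ := ih (s + 1) (s, PySem.Chars.find cs ['@']) ht
      have hred : splitMapScanA ((s, cs) :: PySem.List.enumerate t (s + 1)) acc =
          splitMapScanA (PySem.List.enumerate t (s + 1)) (s, PySem.Chars.find cs ['@']) := by
        simp [splitMapScanA, hfind]
      have hredB : splitMapFindRow ((s, cs) :: PySem.List.enumerate t (s + 1)) =
          splitMapFindRow (PySem.List.enumerate t (s + 1)) := by
        simp [splitMapFindRow, hin]
      refine ⟨cs', by rw [hred, hredB]; exact h1, by rw [hred]; exact h2, h3, by rw [hred]; omega, ?_⟩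
      rw [hred]
      set y := (splitMapScanA (PySem.List.enumerate t (s + 1)) (s, PySem.Chars.find cs ['@'])).1
      have hy : y - s = (y - (s + 1)) + 1 := by ring
      rw [hy, pyGet?_cons_succ _ _ _ (by omega)]
      exact h5
-- membership in a conditional-add fold
theorem mem_foldl_addIf {α : Type} (P : α → Prop) [DecidablePred P] (f : α → Char) (c : Char) :
    ∀ (l : List α) (s : PySem.Set Char),
      c ∈ l.foldl (fun s a => if P a then PySem.Set.add s (f a) else s) s ↔
        c ∈ s ∨ ∃ a ∈ l, P a ∧ f a = c := by
  intro l
  induction l with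
  | nil => intro s; simp
  | cons a t ih =>
    intro s
    rw [List.foldl_cons]
    by_cases hP : P a
    · rw [if_pos hP, ih]
      simp only [PySem.Set.mem_add, List.mem_cons]
      constructor
      · rintro ((h | h) | ⟨b, hb, h⟩)
        · exact Or.inl h
        · exact Or.inr ⟨a, Or.inl rfl, hP, h.symm⟩
        · exact Or.inr ⟨b, Or.inr hb, h⟩
      · rintro (h | ⟨b, (rfl | hb), h⟩)
        · exact Or.inl (Or.inl h)
        · exact Or.inl (Or.inr h.2.symm)
        · exact Or.inr ⟨b, hb, h⟩
    · rw [if_neg hP, ih]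
      simp only [List.mem_cons]
      constructor
      · rintro (h | ⟨b, hb, h⟩)
        · exact Or.inl h
        · exact Or.inr ⟨b, Or.inr hb, h⟩
      · rintro (h | ⟨b, (rfl | hb), h⟩)
        · exact Or.inl h
        · exact absurd h.1 hP
        · exact Or.inr ⟨b, hb, h⟩

-- two-level version: the outer fold over rows of inner conditional-add folds
theorem mem_outer_fold (P : Int → Int → Prop) [inst : ∀ r k, Decidable (P r k)] (c : Char) :
    ∀ (el : List (Int × List Char)) (s : PySem.Set Char),
      c ∈ el.foldl (fun s rl => (PySem.List.enumerate rl.2 0).foldl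
          (fun s2 kc => if ¬ PySem.Chars.isIn [kc.2] ['.', '#'] = true ∧ P rl.1 kc.1
                        then PySem.Set.add s2 kc.2 else s2) s) s ↔
        c ∈ s ∨ ∃ rl ∈ el, ∃ kc ∈ PySem.List.enumerate rl.2 0,
          ¬ PySem.Chars.isIn [kc.2] ['.', '#'] = true ∧ P rl.1 kc.1 ∧ kc.2 = c := by
  intro el
  induction el with
  | nil => intro s; simp
  | cons rl t ih =>
    intro s
    rw [List.foldl_cons, ih,
      mem_foldl_addIf (fun kc : Int × Char => ¬ PySem.Chars.isIn [kc.2] ['.', '#'] = true ∧ P rl.1 kc.1) (fun kc => kc.2) c]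
    constructor
    · rintro ((h | ⟨kc, hkc, h1, h2⟩) | ⟨rl', hrl', h⟩)
      · exact Or.inl h
      · exact Or.inr ⟨rl, List.mem_cons_self, kc, hkc, h1.1, h1.2, h2⟩
      · exact Or.inr ⟨rl', List.mem_cons_of_mem _ hrl', h⟩
    · rintro (h | ⟨rl', hrl', kc, hkc, h1, h2, h3⟩)
      · exact Or.inl (Or.inl h)
      · rcases List.mem_cons.mp hrl' with rfl | hmem
        · exact Or.inl (Or.inr ⟨kc, hkc, ⟨h1, h2⟩, h3⟩)
        · exact Or.inr ⟨rl', hmem, kc, hkc, h1, h2, h3⟩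

-- one component-wise fold over a 4-tuple is four independent folds
theorem foldl_prod4_indep {α S : Type} (F0 F1 F2 F3 : S → α → S) :
    ∀ (l : List α) (s0 s1 s2 s3 : S),
      l.foldl (fun st a => (F0 st.1 a, F1 st.2.1 a, F2 st.2.2.1 a, F3 st.2.2.2 a)) (s0, s1, s2, s3) =
        (l.foldl F0 s0, l.foldl F1 s1, l.foldl F2 s2, l.foldl F3 s3) := by
  intro l
  induction l with
  | nil => intro s0 s1 s2 s3; rfl
  | cons a t ih => intro s0 s1 s2 s3; rw [List.foldl_cons]; exact ih _ _ _ _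

-- the guarded four-way add of Source B's inner loop, seen component-wise
theorem foldl_quad {α : Type} (g : α → Bool) (P0 P1 P2 P3 : α → Prop)
    [DecidablePred P0] [DecidablePred P1] [DecidablePred P2] [DecidablePred P3] (f : α → Char) :
    ∀ (l : List α) (s0 s1 s2 s3 : PySem.Set Char),
      l.foldl (fun st2 a => if g a then st2 else
          (if P0 a then PySem.Set.add st2.1 (f a) else st2.1,
           if P1 a then PySem.Set.add st2.2.1 (f a) else st2.2.1,
           if P2 a then PySem.Set.add st2.2.2.1 (f a) else st2.2.2.1,
           if P3 a then PySem.Set.add st2.2.2.2 (f a) else st2.2.2.2)) (s0, s1, s2, s3) =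
        (l.foldl (fun s a => if ¬ g a = true ∧ P0 a then PySem.Set.add s (f a) else s) s0,
         l.foldl (fun s a => if ¬ g a = true ∧ P1 a then PySem.Set.add s (f a) else s) s1,
         l.foldl (fun s a => if ¬ g a = true ∧ P2 a then PySem.Set.add s (f a) else s) s2,
         l.foldl (fun s a => if ¬ g a = true ∧ P3 a then PySem.Set.add s (f a) else s) s3) := by
  intro l
  induction l with
  | nil => intro s0 s1 s2 s3; rfl
  | cons a t ih =>
    intro s0 s1 s2 s3
    have hstep : (if g a = true then ((s0, s1, s2, s3) : PySem.Set Char × PySem.Set Char × PySem.Set Char × PySem.Set Char) else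
        (if P0 a then PySem.Set.add s0 (f a) else s0,
         if P1 a then PySem.Set.add s1 (f a) else s1,
         if P2 a then PySem.Set.add s2 (f a) else s2,
         if P3 a then PySem.Set.add s3 (f a) else s3)) =
        (if ¬ g a = true ∧ P0 a then PySem.Set.add s0 (f a) else s0,
         if ¬ g a = true ∧ P1 a then PySem.Set.add s1 (f a) else s1,
         if ¬ g a = true ∧ P2 a then PySem.Set.add s2 (f a) else s2,
         if ¬ g a = true ∧ P3 a then PySem.Set.add s3 (f a) else s3) := by
      by_cases hg : g a = true <;> simp [hg]
    rw [List.foldl_cons, List.foldl_cons, List.foldl_cons, List.foldl_cons, List.foldl_cons, hstep, ih]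

-- collectLetters componentwise: the classification pass per quadrant condition
theorem collect_eq (y x : Int) (m : List (List Char)) :
    collectLetters y x m =
      ((PySem.List.enumerate m 0).foldl (fun s rl => (PySem.List.enumerate rl.2 0).foldl
          (fun s2 kc => if ¬ PySem.Chars.isIn [kc.2] ['.', '#'] = true ∧ (rl.1 ≤ y ∧ kc.1 ≤ x)
                        then PySem.Set.add s2 kc.2 else s2) s) PySem.Set.empty,
       (PySem.List.enumerate m 0).foldl (fun s rl => (PySem.List.enumerate rl.2 0).foldl
          (fun s2 kc => if ¬ PySem.Chars.isIn [kc.2] ['.', '#'] = true ∧ (rl.1 ≤ y ∧ x ≤ kc.1)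
                        then PySem.Set.add s2 kc.2 else s2) s) PySem.Set.empty,
       (PySem.List.enumerate m 0).foldl (fun s rl => (PySem.List.enumerate rl.2 0).foldl
          (fun s2 kc => if ¬ PySem.Chars.isIn [kc.2] ['.', '#'] = true ∧ (y ≤ rl.1 ∧ kc.1 ≤ x)
                        then PySem.Set.add s2 kc.2 else s2) s) PySem.Set.empty,
       (PySem.List.enumerate m 0).foldl (fun s rl => (PySem.List.enumerate rl.2 0).foldl
          (fun s2 kc => if ¬ PySem.Chars.isIn [kc.2] ['.', '#'] = true ∧ (y ≤ rl.1 ∧ x ≤ kc.1)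
                        then PySem.Set.add s2 kc.2 else s2) s) PySem.Set.empty) := by
  unfold collectLetters
  have hstep : (fun (st : PySem.Set Char × PySem.Set Char × PySem.Set Char × PySem.Set Char)
      (rl : Int × List Char) =>
      (PySem.List.enumerate rl.2 0).foldl (fun st2 kc =>
        if PySem.Chars.isIn [kc.2] ['.', '#'] then st2 else
          (if rl.1 ≤ y ∧ kc.1 ≤ x then PySem.Set.add st2.1 kc.2 else st2.1,
           if rl.1 ≤ y ∧ x ≤ kc.1 then PySem.Set.add st2.2.1 kc.2 else st2.2.1,
           if y ≤ rl.1 ∧ kc.1 ≤ x then PySem.Set.add st2.2.2.1 kc.2 else st2.2.2.1,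
           if y ≤ rl.1 ∧ x ≤ kc.1 then PySem.Set.add st2.2.2.2 kc.2 else st2.2.2.2)) st) =
      (fun st rl =>
        ((PySem.List.enumerate rl.2 0).foldl (fun s2 kc =>
            if ¬ PySem.Chars.isIn [kc.2] ['.', '#'] = true ∧ (rl.1 ≤ y ∧ kc.1 ≤ x)
            then PySem.Set.add s2 kc.2 else s2) st.1,
         (PySem.List.enumerate rl.2 0).foldl (fun s2 kc =>
            if ¬ PySem.Chars.isIn [kc.2] ['.', '#'] = true ∧ (rl.1 ≤ y ∧ x ≤ kc.1)
            then PySem.Set.add s2 kc.2 else s2) st.2.1,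
         (PySem.List.enumerate rl.2 0).foldl (fun s2 kc =>
            if ¬ PySem.Chars.isIn [kc.2] ['.', '#'] = true ∧ (y ≤ rl.1 ∧ kc.1 ≤ x)
            then PySem.Set.add s2 kc.2 else s2) st.2.2.1,
         (PySem.List.enumerate rl.2 0).foldl (fun s2 kc =>
            if ¬ PySem.Chars.isIn [kc.2] ['.', '#'] = true ∧ (y ≤ rl.1 ∧ x ≤ kc.1)
            then PySem.Set.add s2 kc.2 else s2) st.2.2.2)) := by
    funext st rl
    obtain ⟨s0, s1, s2, s3⟩ := st
    exact foldl_quad (fun kc : Int × Char => PySem.Chars.isIn [kc.2] ['.', '#'])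
      (fun kc => rl.1 ≤ y ∧ kc.1 ≤ x) (fun kc => rl.1 ≤ y ∧ x ≤ kc.1)
      (fun kc => y ≤ rl.1 ∧ kc.1 ≤ x) (fun kc => y ≤ rl.1 ∧ x ≤ kc.1)
      (fun kc => kc.2) _ s0 s1 s2 s3
  rw [hstep]
  exact foldl_prod4_indep
    (fun (s : PySem.Set Char) (rl : Int × List Char) => (PySem.List.enumerate rl.2 0).foldl (fun s2 kc =>
      if ¬ PySem.Chars.isIn [kc.2] ['.', '#'] = true ∧ (rl.1 ≤ y ∧ kc.1 ≤ x)
      then PySem.Set.add s2 kc.2 else s2) s)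
    (fun (s : PySem.Set Char) (rl : Int × List Char) => (PySem.List.enumerate rl.2 0).foldl (fun s2 kc =>
      if ¬ PySem.Chars.isIn [kc.2] ['.', '#'] = true ∧ (rl.1 ≤ y ∧ x ≤ kc.1)
      then PySem.Set.add s2 kc.2 else s2) s)
    (fun (s : PySem.Set Char) (rl : Int × List Char) => (PySem.List.enumerate rl.2 0).foldl (fun s2 kc =>
      if ¬ PySem.Chars.isIn [kc.2] ['.', '#'] = true ∧ (y ≤ rl.1 ∧ kc.1 ≤ x)
      then PySem.Set.add s2 kc.2 else s2) s)
    (fun (s : PySem.Set Char) (rl : Int × List Char) => (PySem.List.enumerate rl.2 0).foldl (fun s2 kc =>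
      if ¬ PySem.Chars.isIn [kc.2] ['.', '#'] = true ∧ (y ≤ rl.1 ∧ x ≤ kc.1)
      then PySem.Set.add s2 kc.2 else s2) s)
    _ _ _ _ _

theorem mem_take_iff {α : Type} (l : List α) (n : Nat) (a : α) :
    a ∈ l.take n ↔ ∃ i, ∃ h : i < l.length, i < n ∧ l[i] = a := by
  rw [List.mem_iff_getElem]
  constructor
  · rintro ⟨i, h, rfl⟩
    have h2 : i < min n l.length := by simpa [List.length_take] using h
    exact ⟨i, by omega, by omega, (List.getElem_take).symm⟩
  · rintro ⟨i, h, hn, rfl⟩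
    exact ⟨i, by simp [List.length_take]; omega, List.getElem_take⟩

theorem mem_drop_iff {α : Type} (l : List α) (n : Nat) (a : α) :
    a ∈ l.drop n ↔ ∃ i, ∃ h : i < l.length, n ≤ i ∧ l[i] = a := by
  rw [List.mem_iff_getElem]
  constructor
  · rintro ⟨i, h, rfl⟩
    have h2 : i < l.length - n := by simpa [List.length_drop] using h
    exact ⟨n + i, by omega, by omega, (List.getElem_drop ..).symm⟩
  · rintro ⟨i, h, hn, rfl⟩
    refine ⟨i - n, by simp [List.length_drop]; omega, ?_⟩
    rw [List.getElem_drop]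
    congr 1
    omega

-- the glue: a quadrant letter set equals the letters seen in the quadrant slice
theorem quad_chars (m3 : List (List Char)) (rowP colP : Int → Prop)
    [DecidablePred rowP] [DecidablePred colP]
    (rows : List (List Char)) (cslice : List Char → List Char)
    (hrows : ∀ ln, ln ∈ rows ↔ ∃ r : Nat, ∃ h : r < m3.length, rowP (r : Int) ∧ m3[r] = ln)
    (hcs : ∀ (ln : List Char) (c : Char),
      c ∈ cslice ln ↔ ∃ k : Nat, ∃ h : k < ln.length, colP (k : Int) ∧ ln[k] = c)
    (S : PySem.Set Char)
    (hmem : ∀ c, c ∈ S ↔ ∃ rl ∈ PySem.List.enumerate m3 0, ∃ kc ∈ PySem.List.enumerate rl.2 0,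
      ¬ PySem.Chars.isIn [kc.2] ['.', '#'] = true ∧ (rowP rl.1 ∧ colP kc.1) ∧ kc.2 = c) :
    ∀ c, c ∈ S ↔ ∃ ln ∈ rows.map cslice, c ∈ ln ∧ ¬(c = '.' ∨ c = '#') := by
  intro c
  rw [hmem]
  constructor
  · rintro ⟨rl, hrl, kc, hkc, hni, ⟨hr, hk⟩, rfl⟩
    obtain ⟨r, hrlen, rfl⟩ := (PySem.List.mem_enumerate_iff _ _ _).mp hrl
    obtain ⟨k, hklen, rfl⟩ := (PySem.List.mem_enumerate_iff _ _ _).mp hkc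
    simp only [zero_add] at hr hk
    refine ⟨cslice m3[r], List.mem_map.mpr ⟨m3[r], (hrows _).mpr ⟨r, hrlen, hr, rfl⟩, rfl⟩, ?_, ?_⟩
    · exact (hcs _ _).mpr ⟨k, hklen, hk, rfl⟩
    · intro hor
      refine hni ((isIn_singleton_iff _ _).mpr ?_)
      rcases hor with h | h <;> simp at h <;> simp [h]
  · rintro ⟨ln, hline, hcl, hns⟩
    obtain ⟨line0, hl0, rfl⟩ := List.mem_map.mp hline
    obtain ⟨r, hrlen, hr, rfl⟩ := (hrows _).mp hl0
    obtain ⟨k, hklen, hk, rfl⟩ := (hcs _ _).mp hcl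
    refine ⟨((0 : Int) + r, m3[r]), (PySem.List.mem_enumerate_iff _ _ _).mpr ⟨r, hrlen, rfl⟩,
      ((0 : Int) + k, m3[r][k]), (PySem.List.mem_enumerate_iff _ _ _).mpr ⟨k, hklen, rfl⟩, ?_, ?_, rfl⟩
    · intro hin
      have hm := (isIn_singleton_iff _ _).mp hin
      simp only [List.mem_cons, List.not_mem_nil, or_false] at hm
      exact hns hm
    · constructor
      · simpa using hr
      · simpa using hk

-- ===== VERDICT (by name: the statement is the Claim_ definition above) =====
theorem split_map_spec : Claim_equal_split_map := by
  intro the_map _ hpre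
  unfold Spec_split_map
  obtain ⟨hany, -⟩ := hpre
  have hf : (fun s : String => PySem.Str.isIn "@" s) =
      (fun s : String => PySem.Chars.isIn ['@'] s.toList) := by
    funext s
    rw [PySem.Str.isIn_eq]
    congr 1
  have hanym : (the_map.map String.toList).any (fun cs => PySem.Chars.isIn ['@'] cs) = true := by
    rw [List.any_map]
    simp only [Function.comp_def]
    rw [← hf]
    exact hany
  obtain ⟨cs, hB, hx, hfne, hle, hget⟩ := scan_spec (the_map.map String.toList) 0 (0, -1) hanym
  rw [sub_zero] at hget
  simp only [split_map, split_map_alt]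
  rw [hB]
  have hgl : pyLineGet (the_map.map String.toList)
      (splitMapScanA (PySem.List.enumerate (the_map.map String.toList) 0) (0, -1)).1 = cs := by
    unfold pyLineGet
    rw [hget]
    rfl
  simp only [List.foldl_cons, List.foldl_nil, hgl, hx]
  rw [show (splitMapScanA (PySem.List.enumerate (the_map.map String.toList) 0) (0, -1)).1 + -1 =
    (splitMapScanA (PySem.List.enumerate (the_map.map String.toList) 0) (0, -1)).1 - 1 by ring,
    add_zero]
  set Y := (splitMapScanA (PySem.List.enumerate (the_map.map String.toList) 0) (0, -1)).1 with hY
  set X := PySem.Chars.find cs ['@'] with hX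
  have hy0 : 0 ≤ Y := hle
  have hx0 : 0 ≤ X := by
    rw [hX, PySem.Chars.find_nonneg_iff]
    rw [PySem.Chars.find_ne_neg_one_iff] at hfne
    exact hfne
  set m := the_map.map String.toList with hm
  set m3 := pyLineSet (pyLineSet (pyLineSet m (Y - 1) (stampLine (pyLineGet m (Y - 1)) X ['@', '#', '@']))
      Y (stampLine (pyLineGet (pyLineSet m (Y - 1) (stampLine (pyLineGet m (Y - 1)) X ['@', '#', '@'])) Y) X ['#', '#', '#']))
      (Y + 1) (stampLine (pyLineGet (pyLineSet (pyLineSet m (Y - 1) (stampLine (pyLineGet m (Y - 1)) X ['@', '#', '@']))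
      Y (stampLine (pyLineGet (pyLineSet m (Y - 1) (stampLine (pyLineGet m (Y - 1)) X ['@', '#', '@'])) Y) X ['#', '#', '#'])) (Y + 1)) X ['@', '#', '@']) with hm3
  -- row-slice characterizations
  have hrows_top : ∀ ln, ln ∈ PySem.List.slice m3 none (some (Y + 1)) ↔
      ∃ r : Nat, ∃ h : r < m3.length, ((r : Int) ≤ Y) ∧ m3[r] = ln := by
    intro ln
    rw [PySem.List.slice_to _ (by omega), mem_take_iff]
    constructor
    · rintro ⟨i, h, hn, rfl⟩; exact ⟨i, h, by omega, rfl⟩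
    · rintro ⟨i, h, hn, rfl⟩; exact ⟨i, h, by omega, rfl⟩
  have hrows_bot : ∀ ln, ln ∈ PySem.List.slice m3 (some Y) none ↔
      ∃ r : Nat, ∃ h : r < m3.length, (Y ≤ (r : Int)) ∧ m3[r] = ln := by
    intro ln
    rw [PySem.List.slice_from _ hy0, mem_drop_iff]
    constructor
    · rintro ⟨i, h, hn, rfl⟩; exact ⟨i, h, by omega, rfl⟩
    · rintro ⟨i, h, hn, rfl⟩; exact ⟨i, h, by omega, rfl⟩
  -- column-slice characterizations
  have hcs_left : ∀ (ln : List Char) (c : Char), c ∈ PySem.Chars.slice ln none (some (X + 1)) ↔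
      ∃ k : Nat, ∃ h : k < ln.length, ((k : Int) ≤ X) ∧ ln[k] = c := by
    intro ln c
    rw [PySem.Chars.slice_eq_listSlice, PySem.List.slice_to _ (by omega), mem_take_iff]
    constructor
    · rintro ⟨i, h, hn, rfl⟩; exact ⟨i, h, by omega, rfl⟩
    · rintro ⟨i, h, hn, rfl⟩; exact ⟨i, h, by omega, rfl⟩
  have hcs_right : ∀ (ln : List Char) (c : Char), c ∈ PySem.Chars.slice ln (some X) none ↔
      ∃ k : Nat, ∃ h : k < ln.length, (X ≤ (k : Int)) ∧ ln[k] = c := by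
    intro ln c
    rw [PySem.Chars.slice_eq_listSlice, PySem.List.slice_from _ hx0, mem_drop_iff]
    constructor
    · rintro ⟨i, h, hn, rfl⟩; exact ⟨i, h, by omega, rfl⟩
    · rintro ⟨i, h, hn, rfl⟩; exact ⟨i, h, by omega, rfl⟩
  -- letter-set membership per quadrant
  have hcoll := collect_eq Y X m3
  have hmem0 : ∀ c, c ∈ (collectLetters Y X m3).1 ↔
      ∃ rl ∈ PySem.List.enumerate m3 0, ∃ kc ∈ PySem.List.enumerate rl.2 0,
        ¬ PySem.Chars.isIn [kc.2] ['.', '#'] = true ∧ ((rl.1 ≤ Y) ∧ (kc.1 ≤ X)) ∧ kc.2 = c := by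
    intro c
    rw [hcoll]
    rw [mem_outer_fold (fun r k => r ≤ Y ∧ k ≤ X) c]
    simp [PySem.Set.empty, and_assoc]
  have hmem1 : ∀ c, c ∈ (collectLetters Y X m3).2.1 ↔
      ∃ rl ∈ PySem.List.enumerate m3 0, ∃ kc ∈ PySem.List.enumerate rl.2 0,
        ¬ PySem.Chars.isIn [kc.2] ['.', '#'] = true ∧ ((rl.1 ≤ Y) ∧ (X ≤ kc.1)) ∧ kc.2 = c := by
    intro c
    rw [hcoll]
    rw [mem_outer_fold (fun r k => r ≤ Y ∧ X ≤ k) c]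
    simp [PySem.Set.empty, and_assoc]
  have hmem2 : ∀ c, c ∈ (collectLetters Y X m3).2.2.1 ↔
      ∃ rl ∈ PySem.List.enumerate m3 0, ∃ kc ∈ PySem.List.enumerate rl.2 0,
        ¬ PySem.Chars.isIn [kc.2] ['.', '#'] = true ∧ ((Y ≤ rl.1) ∧ (kc.1 ≤ X)) ∧ kc.2 = c := by
    intro c
    rw [hcoll]
    rw [mem_outer_fold (fun r k => Y ≤ r ∧ k ≤ X) c]
    simp [PySem.Set.empty, and_assoc]
  have hmem3 : ∀ c, c ∈ (collectLetters Y X m3).2.2.2 ↔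
      ∃ rl ∈ PySem.List.enumerate m3 0, ∃ kc ∈ PySem.List.enumerate rl.2 0,
        ¬ PySem.Chars.isIn [kc.2] ['.', '#'] = true ∧ ((Y ≤ rl.1) ∧ (X ≤ kc.1)) ∧ kc.2 = c := by
    intro c
    rw [hcoll]
    rw [mem_outer_fold (fun r k => Y ≤ r ∧ X ≤ k) c]
    simp [PySem.Set.empty, and_assoc]
  have hq0 := quad_chars m3 (fun r => r ≤ Y) (fun k => k ≤ X)
    (PySem.List.slice m3 none (some (Y + 1))) (fun l => PySem.Chars.slice l none (some (X + 1)))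
    hrows_top hcs_left (collectLetters Y X m3).1 hmem0
  have hq1 := quad_chars m3 (fun r => r ≤ Y) (fun k => X ≤ k)
    (PySem.List.slice m3 none (some (Y + 1))) (fun l => PySem.Chars.slice l (some X) none)
    hrows_top hcs_right (collectLetters Y X m3).2.1 hmem1
  have hq2 := quad_chars m3 (fun r => Y ≤ r) (fun k => k ≤ X)
    (PySem.List.slice m3 (some Y) none) (fun l => PySem.Chars.slice l none (some (X + 1)))
    hrows_bot hcs_left (collectLetters Y X m3).2.2.1 hmem2
  have hq3 := quad_chars m3 (fun r => Y ≤ r) (fun k => X ≤ k)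
    (PySem.List.slice m3 (some Y) none) (fun l => PySem.Chars.slice l (some X) none)
    hrows_bot hcs_right (collectLetters Y X m3).2.2.2 hmem3
  have e0 : splitMapStripA ((PySem.List.slice m3 none (some (Y + 1))).map
        (fun l => PySem.Chars.slice l none (some (X + 1)))) =
      buildQuadrantB (collectLetters Y X m3).1 (PySem.List.slice m3 none (some (Y + 1))) none (some (X + 1)) := by
    rw [stripA_eq _ _ hq0, List.map_map]; rfl
  have e1 : splitMapStripA ((PySem.List.slice m3 none (some (Y + 1))).map
        (fun l => PySem.Chars.slice l (some X) none)) =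
      buildQuadrantB (collectLetters Y X m3).2.1 (PySem.List.slice m3 none (some (Y + 1))) (some X) none := by
    rw [stripA_eq _ _ hq1, List.map_map]; rfl
  have e2 : splitMapStripA ((PySem.List.slice m3 (some Y) none).map
        (fun l => PySem.Chars.slice l none (some (X + 1)))) =
      buildQuadrantB (collectLetters Y X m3).2.2.1 (PySem.List.slice m3 (some Y) none) none (some (X + 1)) := by
    rw [stripA_eq _ _ hq2, List.map_map]; rfl
  have e3 : splitMapStripA ((PySem.List.slice m3 (some Y) none).map
        (fun l => PySem.Chars.slice l (some X) none)) =
      buildQuadrantB (collectLetters Y X m3).2.2.2 (PySem.List.slice m3 (some Y) none) (some X) none := by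
    rw [stripA_eq _ _ hq3, List.map_map]; rfl
  rw [e0, e1, e2, e3]
  simp
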